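-- pv_equiv track=rewrite | github.com/steffiindrayani/news_generator_web | model.py | giveDefaultInfo
-- ===== SOURCE A (Python) =====
-- def giveDefaultInfo(types):
--     value_type = []
--     defaultType = ["Jumlah Suara", "Total Kemenangan", "Persentase Partisipasi Pemilih", "Jumlah Suara Sah", "Total DPT", "Persentase Partisipasi Pemilih", "Persentase Suara"]
--     for vtype in types:
--         if vtype in defaultType:
--             value_type.append((vtype, "default"))
--         else:
--             value_type.append((vtype, "nondefault"))
--     value_type = sorted(value_type, key=lambda tup: tup[1])
--     return [ "%s,%s" % x for x in value_type]
-- ===== SOURCE B (Python) =====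
-- def giveDefaultInfo(types):
--     default_set = {"Jumlah Suara", "Total Kemenangan", "Persentase Partisipasi Pemilih", "Jumlah Suara Sah", "Total DPT", "Persentase Suara"}
--     defaults = []
--     nondefaults = []
--     for vtype in types:
--         if vtype in default_set:
--             defaults.append(vtype + ",default")
--         else:
--             nondefaults.append(vtype + ",nondefault")
--     return defaults + nondefaults
-- ===== Notes on version B (the rewrite author's own statement) =====
-- stated objective: simpler
-- what changed: Replaces the tag-every-element, stable-sort-by-tag, then-format pipeline with a single pass that partitions the formatted strings into a defaults list and a nondefaults list and concatenates them.
import Mathlib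
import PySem

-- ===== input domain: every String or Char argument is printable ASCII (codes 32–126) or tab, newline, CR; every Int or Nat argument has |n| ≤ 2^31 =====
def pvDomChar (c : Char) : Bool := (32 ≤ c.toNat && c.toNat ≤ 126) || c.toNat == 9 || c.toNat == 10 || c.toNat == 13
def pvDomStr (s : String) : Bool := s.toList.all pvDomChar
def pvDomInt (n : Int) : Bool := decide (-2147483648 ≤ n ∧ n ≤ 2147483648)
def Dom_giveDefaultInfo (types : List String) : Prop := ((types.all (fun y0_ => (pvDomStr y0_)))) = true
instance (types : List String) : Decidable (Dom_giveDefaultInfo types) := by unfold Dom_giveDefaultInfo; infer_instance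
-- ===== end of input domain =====

-- B replaces tag-then-stable-sort-then-format with a single partitioning pass (simpler, one traversal).


-- ===== PORT A =====
def pvDefaultType : List String :=
  ["Jumlah Suara", "Total Kemenangan", "Persentase Partisipasi Pemilih", "Jumlah Suara Sah",
   "Total DPT", "Persentase Partisipasi Pemilih", "Persentase Suara"]

def giveDefaultInfo (types : List String) : List String :=
  let value_type : List (String × String) :=
    types.foldl (fun acc vtype =>
      if vtype ∈ pvDefaultType then acc ++ [(vtype, "default")]
      else acc ++ [(vtype, "nondefault")]) []
  let value_type := PySem.List.sorted value_type (fun tup => tup.2)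
  value_type.map (fun x => x.1 ++ "," ++ x.2)

-- ===== PORT B =====
def pvDefaultSet : PySem.Set String :=
  PySem.Set.ofList ["Jumlah Suara", "Total Kemenangan", "Persentase Partisipasi Pemilih",
    "Jumlah Suara Sah", "Total DPT", "Persentase Suara"]

def giveDefaultInfo_alt (types : List String) : List String :=
  let p : List String × List String :=
    types.foldl (fun p vtype =>
      if vtype ∈ pvDefaultSet then (p.1 ++ [vtype ++ ",default"], p.2)
      else (p.1, p.2 ++ [vtype ++ ",nondefault"])) ([], [])
  p.1 ++ p.2

-- ===== PRECONDITION & SPEC =====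
def Spec_giveDefaultInfo (types : List String) (out : List String) : Prop := out = giveDefaultInfo_alt types
instance (types : List String) (out : List String) : Decidable (Spec_giveDefaultInfo types out) := by unfold Spec_giveDefaultInfo; infer_instance

-- ===== CLAIM (what is proved, stated in full; the proofs are below) =====
def Claim_equal_giveDefaultInfo : Prop := ∀ (types : List String), Dom_giveDefaultInfo types → Spec_giveDefaultInfo types (giveDefaultInfo types)

-- ===== LEMMAS AND PROOFS =====

-- A's tagging of a single element.
def pvTag (v : String) : String × String :=
  if v ∈ pvDefaultType then (v, "default") else (v, "nondefault")

-- the comparison used by the stable insertion sort with key tup.2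
def pvBef (a b : String × String) : Bool := decide (a.2 < b.2)

theorem pvMemSet_iff (v : String) : v ∈ pvDefaultSet ↔ v ∈ pvDefaultType := by
  simp [pvDefaultSet, pvDefaultType, PySem.Set.mem_ofList]
  tauto

theorem foldl_tag_eq_map (ts : List String) (acc : List (String × String)) :
    ts.foldl (fun acc vtype =>
      if vtype ∈ pvDefaultType then acc ++ [(vtype, "default")]
      else acc ++ [(vtype, "nondefault")]) acc = acc ++ ts.map pvTag := by
  induction ts generalizing acc with
  | nil => simp
  | cons v ts ih => by_cases h : v ∈ pvDefaultType <;> simp [h, ih, pvTag]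

theorem insertBy_append_not {α : Type} (before : α → α → Bool) (x : α) (ds ns : List α)
    (h : ∀ y ∈ ds, before x y = false) :
    PySem.List.insertBy before x (ds ++ ns) = ds ++ PySem.List.insertBy before x ns := by
  induction ds with
  | nil => simp
  | cons d ds ih =>
    have hd := h d (by simp)
    simp [PySem.List.insertBy, hd, ih (fun y hy => h y (by simp [hy]))]

-- core invariant: the insertion-sort fold over tagged elements keeps the list as
-- (all-default part) ++ (all-nondefault part), each in encounter order, and its
-- formatting matches B's partitioning fold.
theorem main_inv (ts : List String) (ds ns : List (String × String))
    (hds : ∀ p ∈ ds, p.2 = "default") (hns : ∀ p ∈ ns, p.2 = "nondefault") :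
    (ts.foldl (fun acc v => PySem.List.insertBy pvBef (pvTag v) acc) (ds ++ ns)).map
        (fun x => x.1 ++ "," ++ x.2)
      =
    (ts.foldl (fun p vtype =>
        if vtype ∈ pvDefaultSet then (p.1 ++ [vtype ++ ",default"], p.2)
        else (p.1, p.2 ++ [vtype ++ ",nondefault"]))
      (ds.map (fun x => x.1 ++ "," ++ x.2), ns.map (fun x => x.1 ++ "," ++ x.2))).1
    ++
    (ts.foldl (fun p vtype =>
        if vtype ∈ pvDefaultSet then (p.1 ++ [vtype ++ ",default"], p.2)
        else (p.1, p.2 ++ [vtype ++ ",nondefault"]))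
      (ds.map (fun x => x.1 ++ "," ++ x.2), ns.map (fun x => x.1 ++ "," ++ x.2))).2 := by
  induction ts generalizing ds ns with
  | nil => simp
  | cons v ts ih =>
    by_cases h : v ∈ pvDefaultType
    · have htag : pvTag v = (v, "default") := by simp [pvTag, h]
      have hins : PySem.List.insertBy pvBef (v, "default") (ds ++ ns)
          = (ds ++ [(v, "default")]) ++ ns := by
        have h1 : ∀ y ∈ ds, pvBef (v, "default") y = false := by
          intro y hy
          simp [pvBef, hds y hy]
        rw [insertBy_append_not _ _ _ _ h1]
        cases ns with
        | nil => simp [PySem.List.insertBy]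
        | cons n ns =>
          have hn : pvBef (v, "default") (n :: ns).head! = true := by
            simp [pvBef, hns n (by simp)]
            decide
          simp at hn
          simp [PySem.List.insertBy, hn]
      have hset : v ∈ pvDefaultSet := (pvMemSet_iff v).mpr h
      have ih' := ih (ds ++ [(v, "default")]) ns
        (fun p hp => by rcases List.mem_append.mp hp with hp | hp
                        · exact hds p hp
                        · simp at hp; simp [hp]) hns
      have hc : ("," ++ "default" : String) = ",default" := rfl
      simp only [List.foldl_cons, htag, hins, if_pos hset]
      simpa [String.append_assoc, hc] using ih'
    · have htag : pvTag v = (v, "nondefault") := by simp [pvTag, h]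
      have hall : ∀ y ∈ ds ++ ns, pvBef (v, "nondefault") y = false := by
        intro y hy
        rcases List.mem_append.mp hy with hy | hy
        · simp [pvBef, hds y hy]; decide
        · simp [pvBef, hns y hy]
      have hins : PySem.List.insertBy pvBef (v, "nondefault") (ds ++ ns)
          = ds ++ (ns ++ [(v, "nondefault")]) := by
        rw [PySem.List.insertBy_of_forall_not_before _ _ _ hall]
        simp
      have hset : v ∉ pvDefaultSet := fun hc => h ((pvMemSet_iff v).mp hc)
      have ih' := ih ds (ns ++ [(v, "nondefault")]) hds
        (fun p hp => by rcases List.mem_append.mp hp with hp | hp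
                        · exact hns p hp
                        · simp at hp; simp [hp])
      have hc : ("," ++ "nondefault" : String) = ",nondefault" := rfl
      simp only [List.foldl_cons, htag, hins, if_neg hset]
      simpa [String.append_assoc, hc] using ih'

-- ===== VERDICT (by name: the statement is the Claim_ definition above) =====
theorem giveDefaultInfo_spec : Claim_equal_giveDefaultInfo := by
  intro types _
  unfold Spec_giveDefaultInfo giveDefaultInfo giveDefaultInfo_alt
  simp only [foldl_tag_eq_map, List.nil_append,
    PySem.List.sorted_eq_foldl_insertBy, List.foldl_map]
  exact main_inv types [] [] (by simp) (by simp)
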